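-- pv_equiv track=rewrite | github.com/sarik/Algo_DS | longestIncreasingSubarray.py | longestNonDecreasningSubarray_NonContiguous
-- ===== SOURCE A (Python) =====
-- def longestNonDecreasningSubarray_NonContiguous(arr):
--
--     no = len(arr)
--
--
--
--     #dp[i] = longestIncreasingSubarray till index i
--     dp=[1 for i in range(len(arr))]
--
--
--
--     for i in range(1,no):
--         for j in range(0,i):
--             if arr[i] >= arr[j]:
--                 dp[i] = max(dp[j]+1,dp[i])
--
--
--     return dp,max(dp)
-- ===== SOURCE B (Python) =====
-- def longestNonDecreasningSubarray_NonContiguous(arr):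
--     # Aggregate dp lengths by value: best[v] = longest chain ending exactly in value v.
--     # One pass; the inner scan is over distinct values seen so far, not over all indices.
--     best = {}
--     dp = []
--     for x in arr:
--         d = 1 + max((bd for v, bd in best.items() if v <= x), default=0)
--         dp.append(d)
--         best[x] = d
--     return dp, max(dp)
-- ===== Notes on version B (the rewrite author's own statement) =====
-- stated objective: alternative
-- what changed: Replaces the index-based O(n^2) double loop over dp with a single fold that maintains a dict mapping each distinct value to the best chain length ending in that value, so the inner scan is over distinct values seen so far instead of all earlier indices.
import Mathlib
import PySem

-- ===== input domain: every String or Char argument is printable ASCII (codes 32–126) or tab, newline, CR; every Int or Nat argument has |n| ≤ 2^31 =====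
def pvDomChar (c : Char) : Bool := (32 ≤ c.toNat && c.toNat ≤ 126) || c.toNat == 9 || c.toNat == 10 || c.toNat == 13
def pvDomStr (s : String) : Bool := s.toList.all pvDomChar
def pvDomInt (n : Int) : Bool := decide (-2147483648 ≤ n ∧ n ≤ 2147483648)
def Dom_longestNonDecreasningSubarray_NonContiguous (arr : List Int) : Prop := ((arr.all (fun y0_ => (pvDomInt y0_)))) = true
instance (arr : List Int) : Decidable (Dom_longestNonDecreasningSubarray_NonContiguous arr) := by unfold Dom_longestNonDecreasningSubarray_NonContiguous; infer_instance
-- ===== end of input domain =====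

-- B replaces A's O(n^2) index double loop by one pass with a dict value -> best chain length
-- ending in that value (alternative decomposition; equivalence of the return values is proved).

-- ===== PORT A =====
-- literal port of A: dp list of 1s, nested index loops; 'max(dp)' ported as max?.getD 0
-- (Python raises ValueError on empty dp — excluded by Pre_). All indices are in range, so
-- arr[i]/dp[i] are ported with pyGetD/pySetD (exact on in-range indices).
def longestNonDecreasningSubarray_NonContiguous (arr : List Int) : List Int × Int :=
  let no : Int := arr.length
  let dp0 : List Int := (PySem.List.pyRange 0 (arr.length) 1).map (fun _ => (1 : Int))
  let dp := (PySem.List.pyRange 1 no 1).foldl (fun dp i =>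
    (PySem.List.pyRange 0 i 1).foldl (fun dp j =>
      if PySem.List.pyGetD arr i 0 ≥ PySem.List.pyGetD arr j 0 then
        PySem.List.pySetD dp i (max (PySem.List.pyGetD dp j 0 + 1) (PySem.List.pyGetD dp i 0))
      else dp) dp) dp0
  (dp, (PySem.List.max? dp (fun y => y)).getD 0)

-- ===== PORT B =====
-- literal port of Source B: fold over arr keeping (best : dict value -> best dp, dp list so far)
def longestNonDecreasningSubarray_NonContiguous_alt (arr : List Int) : List Int × Int :=
  let st := arr.foldl (fun (st : PySem.Dict Int Int × List Int) x =>
      let d := 1 + st.1.items.foldl (fun m p => if p.1 ≤ x then max m p.2 else m) 0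
      (st.1.insert x d, st.2 ++ [d])) (PySem.Dict.empty, [])
  (st.2, (PySem.List.max? st.2 (fun y => y)).getD 0)

-- ===== PRECONDITION & SPEC =====
-- Pre_: Python A raises ValueError (max of empty sequence) on the empty list; excluded.
def Pre_longestNonDecreasningSubarray_NonContiguous (arr : List Int) : Prop := arr ≠ []
instance (arr : List Int) : Decidable (Pre_longestNonDecreasningSubarray_NonContiguous arr) := by unfold Pre_longestNonDecreasningSubarray_NonContiguous; infer_instance
def pvWitness_longestNonDecreasningSubarray_NonContiguous : List Int := [3, 1, 2, 2, 5]

def Spec_longestNonDecreasningSubarray_NonContiguous (arr : List Int) (out : List Int × Int) : Prop := out = longestNonDecreasningSubarray_NonContiguous_alt arr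
instance (arr : List Int) (out : List Int × Int) : Decidable (Spec_longestNonDecreasningSubarray_NonContiguous arr out) := by unfold Spec_longestNonDecreasningSubarray_NonContiguous; infer_instance

-- ===== CLAIM (what is proved, stated in full; the proofs are below) =====
def Claim_equal_longestNonDecreasningSubarray_NonContiguous : Prop := ∀ (arr : List Int), Dom_longestNonDecreasningSubarray_NonContiguous arr → Pre_longestNonDecreasningSubarray_NonContiguous arr → Spec_longestNonDecreasningSubarray_NonContiguous arr (longestNonDecreasningSubarray_NonContiguous arr)

-- ===== LEMMAS AND PROOFS =====

-- the common spec: maxLE ps x = max (0, max {p.2 | p ∈ ps, p.1 ≤ x}) as a running-max loop,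
-- and newPairs acc l = the (value, chain-length) pairs produced by scanning l after history acc
def maxLE (ps : List (Int × Int)) (x : Int) : Int :=
  ps.foldl (fun m p => if p.1 ≤ x then max m p.2 else m) 0

def newPairs (acc : List (Int × Int)) : List Int → List (Int × Int)
  | [] => []
  | x :: rest =>
      let v := maxLE acc x + 1
      (x, v) :: newPairs (acc ++ [(x, v)]) rest

theorem maxLE_fold_init_le (x : Int) (ps : List (Int × Int)) (m : Int) :
    m ≤ ps.foldl (fun m p => if p.1 ≤ x then max m p.2 else m) m := by
  induction ps generalizing m with
  | nil => simp
  | cons p t ih =>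
      simp only [List.foldl_cons]
      refine le_trans ?_ (ih _)
      split <;> simp

theorem le_maxLE_fold (x : Int) (ps : List (Int × Int)) (m : Int) {p : Int × Int}
    (hp : p ∈ ps) (hx : p.1 ≤ x) :
    p.2 ≤ ps.foldl (fun m p => if p.1 ≤ x then max m p.2 else m) m := by
  induction ps generalizing m with
  | nil => simp at hp
  | cons q t ih =>
      simp only [List.foldl_cons]
      rcases List.mem_cons.mp hp with hp | hp
      · subst hp
        refine le_trans ?_ (maxLE_fold_init_le x t _)
        simp [hx]
      · exact ih _ hp

theorem maxLE_fold_le (x : Int) (ps : List (Int × Int)) {m M : Int}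
    (hm : m ≤ M) (h : ∀ p ∈ ps, p.1 ≤ x → p.2 ≤ M) :
    ps.foldl (fun m p => if p.1 ≤ x then max m p.2 else m) m ≤ M := by
  induction ps generalizing m with
  | nil => simpa
  | cons q t ih =>
      simp only [List.foldl_cons]
      refine ih ?_ (fun p hp hx => h p (List.mem_cons_of_mem _ hp) hx)
      split
      · exact max_le hm (h q (List.mem_cons_self) (by assumption))
      · exact hm

theorem maxLE_nonneg (ps : List (Int × Int)) (x : Int) : 0 ≤ maxLE ps x :=
  maxLE_fold_init_le x ps 0

theorem le_maxLE {ps : List (Int × Int)} {x : Int} {p : Int × Int}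
    (hp : p ∈ ps) (hx : p.1 ≤ x) : p.2 ≤ maxLE ps x :=
  le_maxLE_fold x ps 0 hp hx

theorem maxLE_le {ps : List (Int × Int)} {x M : Int}
    (h0 : 0 ≤ M) (h : ∀ p ∈ ps, p.1 ≤ x → p.2 ≤ M) : maxLE ps x ≤ M :=
  maxLE_fold_le x ps h0 h

theorem maxLE_eq_of {ps qs : List (Int × Int)} (x : Int)
    (hsub : ∀ p ∈ ps, p ∈ qs)
    (hdom : ∀ q ∈ qs, ∃ p ∈ ps, p.1 = q.1 ∧ q.2 ≤ p.2) :
    maxLE ps x = maxLE qs x := by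
  apply le_antisymm
  · exact maxLE_le (maxLE_nonneg qs x) (fun p hp hx => le_maxLE (hsub p hp) hx)
  · refine maxLE_le (maxLE_nonneg ps x) (fun q hq hx => ?_)
    obtain ⟨p, hp, h1, h2⟩ := hdom q hq
    exact le_trans h2 (le_maxLE hp (h1 ▸ hx))

theorem newPairs_append (acc : List (Int × Int)) (l : List Int) (x : Int) :
    newPairs acc (l ++ [x])
      = newPairs acc l ++ [(x, maxLE (acc ++ newPairs acc l) x + 1)] := by
  induction l generalizing acc with
  | nil => simp [newPairs]
  | cons y t ih =>
      simp only [List.cons_append, newPairs, ih, List.append_assoc, List.cons_append,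
        List.nil_append]

theorem map_fst_newPairs (acc : List (Int × Int)) (l : List Int) :
    (newPairs acc l).map (·.1) = l := by
  induction l generalizing acc with
  | nil => rfl
  | cons y t ih => simp [newPairs, ih]

theorem length_newPairs (acc : List (Int × Int)) (l : List Int) :
    (newPairs acc l).length = l.length := by
  have := congrArg List.length (map_fst_newPairs acc l)
  simpa using this

theorem foldl_max_succ (x : Int) (P : List (Int × Int)) (c : Int) :
    P.foldl (fun c p => if p.1 ≤ x then max (p.2 + 1) c else c) (c + 1)
      = P.foldl (fun m p => if p.1 ≤ x then max m p.2 else m) c + 1 := by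
  induction P generalizing c with
  | nil => rfl
  | cons p t ih =>
      simp only [List.foldl_cons]
      split
      · rw [show max (p.2 + 1) (c + 1) = max c p.2 + 1 by omega]
        exact ih _
      · exact ih _

-- ===== A side =====

theorem inner_fold (arr : List Int) (i : Int) (h0 : 0 ≤ i) (hi : i < (arr.length : Int)) :
    ∀ (js : List Int), (∀ j ∈ js, 0 ≤ j ∧ j < i) → ∀ (dp : List Int), dp.length = arr.length →
    js.foldl (fun dp j =>
        if PySem.List.pyGetD arr i 0 ≥ PySem.List.pyGetD arr j 0 then
          PySem.List.pySetD dp i (max (PySem.List.pyGetD dp j 0 + 1) (PySem.List.pyGetD dp i 0))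
        else dp) dp
      = PySem.List.pySetD dp i
          (js.foldl (fun c j =>
              if PySem.List.pyGetD arr i 0 ≥ PySem.List.pyGetD arr j 0 then
                max (PySem.List.pyGetD dp j 0 + 1) c
              else c) (PySem.List.pyGetD dp i 0)) := by
  intro js
  induction js with
  | nil =>
      intro _ dp hlen
      simp only [List.foldl_nil]
      have hlt : i.toNat < dp.length := by omega
      rw [PySem.List.pySetD_of_nonneg dp _ h0, PySem.List.pyGetD_eq_getElem dp 0 h0 (by omega)]
      exact (List.set_getElem_self hlt).symm
  | cons j t ih =>
      intro hmem dp hlen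
      obtain ⟨hj0, hji⟩ := hmem j (List.mem_cons_self)
      simp only [List.foldl_cons]
      by_cases hc : PySem.List.pyGetD arr i 0 ≥ PySem.List.pyGetD arr j 0
      · rw [if_pos hc, if_pos hc]
        set c1 := max (PySem.List.pyGetD dp j 0 + 1) (PySem.List.pyGetD dp i 0) with hc1
        have hlen' : (PySem.List.pySetD dp i c1).length = arr.length := by
          rw [PySem.List.length_pySetD]; exact hlen
        rw [ih (fun j' hj' => hmem j' (List.mem_cons_of_mem _ hj')) _ hlen']
        -- rewrite reads of the updated list
        have hlt : i.toNat < dp.length := by omega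
        have hget_i : PySem.List.pyGetD (PySem.List.pySetD dp i c1) i 0 = c1 := by
          rw [PySem.List.pySetD_of_nonneg dp _ h0,
            PySem.List.pyGetD_eq_getElem _ 0 h0 (by rw [List.length_set]; omega)]
          simp
        have hget_j : ∀ j' : Int, 0 ≤ j' → j' < i →
            PySem.List.pyGetD (PySem.List.pySetD dp i c1) j' 0 = PySem.List.pyGetD dp j' 0 := by
          intro j' h1 h2
          rw [PySem.List.pySetD_of_nonneg dp _ h0,
            PySem.List.pyGetD_eq_getElem _ 0 h1 (by rw [List.length_set]; omega),
            PySem.List.pyGetD_eq_getElem _ 0 h1 (by omega)]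
          rw [List.getElem_set]
          rw [if_neg (by omega)]
        have hset : PySem.List.pySetD (PySem.List.pySetD dp i c1) i
              = PySem.List.pySetD dp i := by
          funext v
          rw [PySem.List.pySetD_of_nonneg _ _ h0, PySem.List.pySetD_of_nonneg dp _ h0,
            PySem.List.pySetD_of_nonneg dp _ h0, List.set_set]
        rw [hget_i, hset]
        congr 1
        refine PySem.List.foldl_congr_mem _ _ _ _ (fun c j' hj' => ?_)
        obtain ⟨h1, h2⟩ := hmem j' (List.mem_cons_of_mem _ hj')
        rw [hget_j j' h1 h2]
      · rw [if_neg hc, if_neg hc]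
        exact ih (fun j' hj' => hmem j' (List.mem_cons_of_mem _ hj')) dp hlen

def dpSpec (arr : List Int) : List Int := (newPairs [] arr).map (·.2)

theorem outer_fold (arr : List Int) :
    ∀ k : Nat, 1 ≤ k → k ≤ arr.length →
    (PySem.List.pyRange 1 (k : Int) 1).foldl (fun dp i =>
        (PySem.List.pyRange 0 i 1).foldl (fun dp j =>
          if PySem.List.pyGetD arr i 0 ≥ PySem.List.pyGetD arr j 0 then
            PySem.List.pySetD dp i (max (PySem.List.pyGetD dp j 0 + 1) (PySem.List.pyGetD dp i 0))
          else dp) dp)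
      ((PySem.List.pyRange 0 (arr.length : Int) 1).map (fun _ => (1 : Int)))
    = dpSpec (arr.take k) ++ List.replicate (arr.length - k) 1 := by
  intro k hk1 hkn
  induction k with
  | zero => omega
  | succ k ih =>
      by_cases hk : k = 0
      · -- base case k+1 = 1 : the range is empty
        subst hk
        rw [PySem.List.pyRange_one_eq_nil (a := 1) (b := ((0+1:Nat):Int)) (by norm_num)]
        simp only [List.foldl_nil]
        obtain ⟨a, t, rfl⟩ := List.exists_cons_of_ne_nil
          (show arr ≠ [] by intro h; rw [h] at hkn; simp at hkn)
        rw [List.map_const', PySem.List.length_pyRange_one]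
        show List.replicate ((a :: t).length) (1:Int) = dpSpec ((a :: t).take (0+1)) ++ _
        rw [show (a :: t).take (0+1) = [a] from rfl]
        have : dpSpec [a] = [1] := rfl
        rw [this]
        simp [List.replicate_succ]
      · -- inductive step: 1 ≤ k, k + 1 ≤ n
        have hk1' : 1 ≤ k := by omega
        have hkn' : k ≤ arr.length := by omega
        have hklt : k < arr.length := by omega
        have hcast : ((k + 1 : Nat) : Int) = (k : Int) + 1 := by push_cast; ring
        rw [hcast, PySem.List.pyRange_one_succ_right (by exact_mod_cast hk1'),
          List.foldl_append, ih hk1' hkn']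
        simp only [List.foldl_cons, List.foldl_nil]
        set P := newPairs [] (arr.take k) with hP
        have hlenP : P.length = k := by
          rw [hP, length_newPairs, List.length_take]; omega
        set M := P.map (fun p : Int × Int => p.2) with hM
        have hlenM : M.length = k := by rw [hM, List.length_map]; exact hlenP
        have hDlen : (dpSpec (arr.take k) ++ List.replicate (arr.length - k) 1).length
            = arr.length := by
          simp only [List.length_append, List.length_replicate, dpSpec, List.length_map]
          rw [← hP, hlenP]; omega
        have hDM : dpSpec (arr.take k) ++ List.replicate (arr.length - k) 1
            = M ++ List.replicate (arr.length - k) 1 := rfl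
        rw [inner_fold arr (k : Int) (by positivity) (by exact_mod_cast hklt)
            (PySem.List.pyRange 0 (k : Int) 1)
            (fun j hj => by rw [PySem.List.mem_pyRange_one] at hj; exact hj)
            _ hDlen]
        rw [hDM]
        set n := arr.length with hn
        set x := arr[k]'hklt with hxdef
        have hx : PySem.List.pyGetD arr (k : Int) 0 = x := by
          rw [PySem.List.pyGetD_eq_getElem arr 0 (by positivity) (by exact_mod_cast hklt)]
          simp [hxdef]
        have hgetk : PySem.List.pyGetD (M ++ List.replicate (n - k) 1) (k : Int) 0 = 1 := by
          rw [PySem.List.pyGetD_eq_getElem _ 0 (by positivity)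
            (by rw [List.length_append, List.length_replicate, hlenM]; exact_mod_cast (by omega : (k:Int) < (k + (n-k) : Nat)))]
          rw [List.getElem_append_right (by simp [hlenM])]
          simp
        have hbody : ∀ (c : Int), ∀ j ∈ PySem.List.pyRange 0 (k : Int) 1,
            (if PySem.List.pyGetD arr (k:Int) 0 ≥ PySem.List.pyGetD arr j 0 then
              max (PySem.List.pyGetD (M ++ List.replicate (n - k) 1) j 0 + 1) c else c)
            = (if (PySem.List.pyGetD P j (0,0)).1 ≤ x then
                max ((PySem.List.pyGetD P j (0,0)).2 + 1) c else c) := by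
          intro c j hj
          rw [PySem.List.mem_pyRange_one] at hj
          obtain ⟨hj0, hjk⟩ := hj
          have hjnat : j.toNat < k := by omega
          have hPj : PySem.List.pyGetD P j (0,0) = P[j.toNat]'(by omega) := by
            rw [PySem.List.pyGetD_eq_getElem P (0,0) hj0 (by rw [hlenP]; exact_mod_cast hjk)]
          have hfst : (P[j.toNat]'(by omega)).1 = arr[j.toNat]'(by omega) := by
            have h1 := map_fst_newPairs ([] : List (Int × Int)) (arr.take k)
            rw [← hP] at h1
            calc (P[j.toNat]'(by omega)).1
                = (P.map (·.1))[j.toNat]'(by rw [List.length_map, hlenP]; exact hjnat) := by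
                  rw [List.getElem_map]
              _ = arr[j.toNat]'(by omega) := by
                  simp only [h1]; exact List.getElem_take
          have harrj : PySem.List.pyGetD arr j 0 = arr[j.toNat]'(by omega) := by
            rw [PySem.List.pyGetD_eq_getElem arr 0 hj0 (by exact_mod_cast (by omega : j < (arr.length : Int)))]
          have hDj : PySem.List.pyGetD (M ++ List.replicate (n - k) 1) j 0
              = (P[j.toNat]'(by omega)).2 := by
            rw [PySem.List.pyGetD_eq_getElem _ 0 hj0
              (by rw [List.length_append, List.length_replicate, hlenM]; exact_mod_cast (by omega : j < ((k + (n-k) : Nat) : Int)))]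
            rw [List.getElem_append_left (by rw [hlenM]; exact hjnat)]
            simp only [hM, List.getElem_map]
          rw [hx, harrj, hPj, hDj]
          simp only [hfst, ge_iff_le]
        rw [hgetk, PySem.List.foldl_congr_mem _ _ _ _ hbody]
        have hrange : PySem.List.pyRange 0 (k : Int) 1 = PySem.List.pyRange 0 (P.length : Int) 1 := by
          rw [hlenP]
        rw [hrange, PySem.List.foldl_pyRange_zero_pyGetD' P (0,0)
          (fun c p => if p.1 ≤ x then max (p.2 + 1) c else c) 1]
        have hV : P.foldl (fun c p => if p.1 ≤ x then max (p.2 + 1) c else c) 1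
            = maxLE P x + 1 := by
          have h := foldl_max_succ x P 0
          norm_num at h
          rw [h]; rfl
        rw [hV]
        -- now the LHS is pySetD D k (maxLE P x + 1); compute both sides
        have htake : arr.take (k+1) = arr.take k ++ [x] := by
          rw [List.take_add_one, hxdef]
          simp [List.getElem?_eq_getElem hklt]
        rw [show dpSpec (arr.take (k+1)) = M ++ [maxLE P x + 1] by
          rw [dpSpec, htake, newPairs_append, ← hP]
          simp [hM, maxLE]]
        rw [PySem.List.pySetD_of_nonneg _ _ (by positivity)]
        rw [show ((k : Int)).toNat = k from by omega]
        rw [List.set_append, if_neg (by rw [hlenM]; omega), hlenM, Nat.sub_self]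
        rw [show n - k = (n - (k+1)) + 1 from by omega, List.replicate_succ, List.set_cons_zero]
        simp [maxLE]

def DInv (d : PySem.Dict Int Int) (acc : List (Int × Int)) : Prop :=
  (∀ p ∈ d.items, p ∈ acc) ∧ (∀ q ∈ acc, ∃ p ∈ d.items, p.1 = q.1 ∧ q.2 ≤ p.2)

theorem inv_empty : DInv PySem.Dict.empty [] := by
  constructor
  · intro p hp
    simp [PySem.Dict.empty] at hp
  · intro q hq; simp at hq

theorem inv_step {d : PySem.Dict Int Int} {acc : List (Int × Int)} (x : Int)
    (h : DInv d acc) :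
    DInv (d.insert x (maxLE acc x + 1)) (acc ++ [(x, maxLE acc x + 1)]) := by
  obtain ⟨hsub, hdom⟩ := h
  set v := maxLE acc x + 1 with hv
  constructor
  · intro p hp
    rw [PySem.Dict.mem_items_insert] at hp
    rcases hp with hp | ⟨hp, _⟩
    · subst hp; simp
    · exact List.mem_append_left _ (hsub p hp)
  · intro q hq
    rcases List.mem_append.mp hq with hq | hq
    · obtain ⟨p, hp, h1, h2⟩ := hdom q hq
      by_cases hpx : p.1 = x
      · refine ⟨(x, v), PySem.Dict.mem_items_insert_self d x v, by rw [← h1, hpx], ?_⟩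
        have : p.2 ≤ maxLE acc x := le_maxLE (hsub p hp) (le_of_eq hpx)
        omega
      · exact ⟨p, (PySem.Dict.mem_items_insert d x v p).mpr (Or.inr ⟨hp, hpx⟩), h1, h2⟩
    · simp at hq
      subst hq
      exact ⟨(x, v), PySem.Dict.mem_items_insert_self d x v, rfl, le_refl v⟩

theorem B_fold (l : List Int) :
    ∀ (d : PySem.Dict Int Int) (acc : List (Int × Int)) (out : List Int), DInv d acc →
    (l.foldl (fun (st : PySem.Dict Int Int × List Int) x =>
        let dv := 1 + st.1.items.foldl (fun m p => if p.1 ≤ x then max m p.2 else m) 0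
        (st.1.insert x dv, st.2 ++ [dv])) (d, out)).2
      = out ++ (newPairs acc l).map (·.2) := by
  induction l with
  | nil => intro d acc out _; simp [newPairs]
  | cons x t ih =>
      intro d acc out hinv
      simp only [List.foldl_cons]
      have hd : (1 : Int) + d.items.foldl (fun m p => if p.1 ≤ x then max m p.2 else m) 0
          = maxLE acc x + 1 := by
        rw [show d.items.foldl (fun m p => if p.1 ≤ x then max m p.2 else m) 0
            = maxLE d.items x from rfl,
          maxLE_eq_of x hinv.1 hinv.2]
        omega
      simp only [hd]
      rw [ih _ (acc ++ [(x, maxLE acc x + 1)]) _ (inv_step x hinv)]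
      simp [newPairs]

theorem portA_eq (arr : List Int) (h : arr ≠ []) :
    longestNonDecreasningSubarray_NonContiguous arr
      = (dpSpec arr, (PySem.List.max? (dpSpec arr) (fun y => y)).getD 0) := by
  have hn : 1 ≤ arr.length := List.length_pos_iff.mpr h
  simp only [longestNonDecreasningSubarray_NonContiguous]
  rw [outer_fold arr arr.length hn (le_refl _)]
  simp [dpSpec]

theorem portB_eq (arr : List Int) :
    longestNonDecreasningSubarray_NonContiguous_alt arr
      = (dpSpec arr, (PySem.List.max? (dpSpec arr) (fun y => y)).getD 0) := by
  simp only [longestNonDecreasningSubarray_NonContiguous_alt]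
  rw [B_fold arr PySem.Dict.empty [] [] inv_empty]
  rfl

-- ===== VERDICT (by name: the statement is the Claim_ definition above) =====
theorem longestNonDecreasningSubarray_NonContiguous_spec : Claim_equal_longestNonDecreasningSubarray_NonContiguous := by
  intro arr _ hpre
  unfold Spec_longestNonDecreasningSubarray_NonContiguous
  rw [portA_eq arr hpre, portB_eq arr]
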